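-- pv_equiv track=rewrite | github.com/vineeshvk/programming-practice | spoj/95-STPAR/solution_95.py | can_arrange_trucks
-- ===== SOURCE A (Python) =====
-- def can_arrange_trucks(trucks):
--     nextTarget = 1
--     i = 0
--     stack = []
--
--     while i < len(trucks) and nextTarget <= len(trucks):
--         if nextTarget == trucks[i]:
--             nextTarget += 1
--             i += 1
--         elif len(stack) != 0 and stack[-1] == nextTarget:
--             stack.pop()
--             nextTarget += 1
--         elif len(stack) == 0 or stack[-1] >= nextTarget:
--             stack.append(trucks[i])
--             i += 1
--         else:
--             return "no"
--
--     for x in stack[::-1]: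
--         if x != nextTarget:
--             return "no"
--         nextTarget += 1
--     return "yes" if (nextTarget - 1) == len(trucks) else "no"
-- ===== SOURCE B (Python) =====
-- def can_arrange_trucks(trucks):
--     # Divide-and-conquer interval decomposition instead of a stack simulation:
--     # a segment [lo,hi) that must come out as t, t+1, ... is feasible iff its
--     # first truck b satisfies t <= b and the next b-t trucks form the segment
--     # producing t..b-1 while the rest produces b+1 onwards. A LIFO worklist of
--     # segments replaces recursion.
--     todo = [(0, len(trucks), 1)]
--     while todo:
--         lo, hi, t = todo.pop()
--         if lo >= hi:
--             continue
--         b = trucks[lo]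
--         k = b - t
--         if k < 0 or lo + 1 + k > hi:
--             return "no"
--         todo.append((lo + 1, lo + 1 + k, t))
--         todo.append((lo + 1 + k, hi, b + 1))
--     return "yes"
-- ===== Notes on version B (the rewrite author's own statement) =====
-- stated objective: alternative
-- what changed: Replaces A's left-to-right one-stack simulation by a divide-and-conquer interval decomposition: the first truck b of a segment with next target t splits it into the following b-t trucks (which must realize t..b-1) and the remainder (targets from b+1), processed via a LIFO worklist of (lo,hi,target) segments with no simulation stack.
import Mathlib
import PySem

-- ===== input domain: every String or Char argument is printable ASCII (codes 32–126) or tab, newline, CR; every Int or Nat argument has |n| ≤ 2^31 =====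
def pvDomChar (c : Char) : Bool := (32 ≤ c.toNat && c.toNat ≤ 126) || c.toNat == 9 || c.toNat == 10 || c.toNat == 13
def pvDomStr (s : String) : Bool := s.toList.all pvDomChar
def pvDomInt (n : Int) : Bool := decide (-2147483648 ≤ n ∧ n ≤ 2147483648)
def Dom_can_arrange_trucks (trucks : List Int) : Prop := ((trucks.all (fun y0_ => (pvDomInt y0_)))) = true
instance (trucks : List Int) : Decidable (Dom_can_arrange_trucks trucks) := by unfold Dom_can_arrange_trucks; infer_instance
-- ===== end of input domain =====

-- B replaces A's one-stack left-to-right simulation by a divide-and-conquer interval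
-- decomposition over a LIFO worklist of segments (objective: alternative algorithm).

-- termination measures of the two ports, discharged once here (cited by name in decreasing_by)
theorem pvTermA (len i : Nat) (nt : Int) (h1 : i < len) :
    (len - (i + 1)) + ((len : Int) + 1 - (nt + 1)).toNat < (len - i) + ((len : Int) + 1 - nt).toNat :=
  add_lt_add_of_lt_of_le (Nat.sub_lt_sub_left h1 (Nat.lt_succ_self i))
    (Int.toNat_le_toNat (sub_le_sub_left (lt_add_one nt).le ((len : Int) + 1)))

theorem pvTermB (len i : Nat) (nt : Int) (h2 : nt ≤ (len : Int)) :
    (len - i) + ((len : Int) + 1 - (nt + 1)).toNat < (len - i) + ((len : Int) + 1 - nt).toNat :=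
  Nat.add_lt_add_left
    ((Int.toNat_lt_toNat (sub_pos.mpr (Int.lt_add_one_iff.mpr h2))).mpr
      (sub_lt_sub_left (lt_add_one nt) ((len : Int) + 1)))
    (len - i)

theorem pvTermC (len i : Nat) (nt : Int) (h1 : i < len) :
    (len - (i + 1)) + ((len : Int) + 1 - nt).toNat < (len - i) + ((len : Int) + 1 - nt).toNat :=
  Nat.add_lt_add_right (Nat.sub_lt_sub_left h1 (Nat.lt_succ_self i)) _

theorem pvTermSeg1 (x : Nat × Nat × Int) (todo : List (Nat × Nat × Int)) :
    2 * ((todo.map (fun x => x.2.1 - x.1)).sum) + todo.length <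
      2 * (((x :: todo).map (fun x => x.2.1 - x.1)).sum) + (x :: todo).length := by
  simp only [List.map_cons, List.sum_cons, List.length_cons]
  exact Nat.lt_succ_of_le
    (Nat.add_le_add_right
      (Nat.mul_le_mul_left 2 (Nat.le_add_left ((todo.map (fun x => x.2.1 - x.1)).sum) (x.2.1 - x.1)))
      todo.length)

theorem pvTermSeg2 (trucks : List Int) (lo hi : Nat) (t : Int) (todo : List (Nat × Nat × Int))
    (h1 : ¬ lo ≥ hi)
    (h2 : ¬(trucks.getD lo 0 - t < 0 ∨ (hi : Int) < (lo : Int) + 1 + (trucks.getD lo 0 - t))) :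
    2 * ((((lo + 1 + (trucks.getD lo 0 - t).toNat, hi, trucks.getD lo 0 + 1) ::
          (lo + 1, lo + 1 + (trucks.getD lo 0 - t).toNat, t) :: todo).map
            (fun x => x.2.1 - x.1)).sum) +
        ((lo + 1 + (trucks.getD lo 0 - t).toNat, hi, trucks.getD lo 0 + 1) ::
          (lo + 1, lo + 1 + (trucks.getD lo 0 - t).toNat, t) :: todo).length <
      2 * ((((lo, hi, t) :: todo).map (fun x => x.2.1 - x.1)).sum) +
        ((lo, hi, t) :: todo).length := by
  rw [not_or] at h2
  obtain ⟨h2a, h2b⟩ := h2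
  have hlt : lo < hi := Nat.lt_of_not_le h1
  have hknn : (0 : Int) ≤ trucks.getD lo 0 - t := not_lt.1 h2a
  have hcast : ((lo + 1 + (trucks.getD lo 0 - t).toNat : Nat) : Int) =
      (lo : Int) + 1 + (trucks.getD lo 0 - t) := by
    push_cast [Int.toNat_of_nonneg hknn]
    ring
  have hk : lo + 1 + (trucks.getD lo 0 - t).toNat ≤ hi :=
    Nat.cast_le (α := Int) |>.mp (by rw [hcast]; exact not_lt.1 h2b)
  simp only [List.map_cons, List.sum_cons, List.length_cons]
  have e1 : (hi - (lo + 1 + (trucks.getD lo 0 - t).toNat)) +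
      ((lo + 1 + (trucks.getD lo 0 - t).toNat) - (lo + 1)) = hi - (lo + 1) :=
    tsub_add_tsub_cancel hk (Nat.le_add_right (lo + 1) _)
  rw [← Nat.add_assoc (hi - (lo + 1 + (trucks.getD lo 0 - t).toNat))
      ((lo + 1 + (trucks.getD lo 0 - t).toNat) - (lo + 1)) ((todo.map (fun x => x.2.1 - x.1)).sum),
    e1]
  have e2 : (hi - (lo + 1)) + 1 = hi - lo := by
    rw [Nat.sub_succ]
    exact Nat.succ_pred_eq_of_pos (Nat.sub_pos_of_lt hlt)
  rw [← e2, Nat.add_right_comm (hi - (lo + 1)) 1 ((todo.map (fun x => x.2.1 - x.1)).sum),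
    Nat.mul_succ,
    Nat.add_right_comm (2 * ((hi - (lo + 1)) + (todo.map (fun x => x.2.1 - x.1)).sum)) 2
      (todo.length + 1)]
  exact Nat.lt_succ_self _

-- ===== PORT A =====
-- The Python stack (top = last element) is ported with the TOP AT THE HEAD of the list,
-- so stack[-1] is headI, append is cons, pop is tail, and the final `for x in stack[::-1]`
-- walks the list head-first.
-- trailing `for x in stack[::-1]: …` plus the final `(nextTarget - 1) == len(trucks)` check:
def aFinishLoop (len : Nat) (nt : Int) : List Int → String
  | [] => if nt - 1 = (len : Int) then "yes" else "no"
  | x :: rest => if x ≠ nt then "no" else aFinishLoop len (nt + 1) rest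

-- the `while i < len(trucks) and nextTarget <= len(trucks)` loop of A, branch for branch
def aLoop (trucks : List Int) (nt : Int) (i : Nat) (stack : List Int) : String :=
  if h : i < trucks.length ∧ nt ≤ (trucks.length : Int) then
    if trucks[i]'h.1 = nt then aLoop trucks (nt + 1) (i + 1) stack
    else if stack ≠ [] ∧ stack.headI = nt then aLoop trucks (nt + 1) i stack.tail
    else if stack = [] ∨ stack.headI ≥ nt then aLoop trucks nt (i + 1) (trucks[i]'h.1 :: stack)
    else "no"
  else aFinishLoop trucks.length nt stack
termination_by (trucks.length - i) + ((trucks.length : Int) + 1 - nt).toNat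
decreasing_by
  · exact pvTermA trucks.length i nt h.1
  · exact pvTermB trucks.length i nt h.2
  · exact pvTermC trucks.length i nt h.1

def can_arrange_trucks (trucks : List Int) : String := aLoop trucks 1 0 []

-- ===== PORT B =====
-- the `while todo:` worklist loop of Source B; the worklist is a LIFO stack with its top at
-- the head, so the two `todo.append(…)` followed by `todo.pop()` become consing the
-- second child in front of the first.  `trucks[lo]` is in range for every reachable
-- segment (lo < hi ≤ len(trucks) from the initial segment and the guards), so it is
-- ported as getD.
def segLoop (trucks : List Int) : List (Nat × Nat × Int) → String
  | [] => "yes"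
  | (lo, hi, t) :: todo =>
    if lo ≥ hi then segLoop trucks todo
    else
      if trucks.getD lo 0 - t < 0 ∨ (hi : Int) < (lo : Int) + 1 + (trucks.getD lo 0 - t) then "no"
      else segLoop trucks ((lo + 1 + (trucks.getD lo 0 - t).toNat, hi, trucks.getD lo 0 + 1) ::
                           (lo + 1, lo + 1 + (trucks.getD lo 0 - t).toNat, t) :: todo)
termination_by todo => 2 * (todo.map (fun x => x.2.1 - x.1)).sum + todo.length
decreasing_by
  · exact pvTermSeg1 (lo, hi, t) todo
  · rename_i h1 h2
    exact pvTermSeg2 trucks lo hi t todo h1 h2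

def can_arrange_trucks_alt (trucks : List Int) : String :=
  segLoop trucks [(0, trucks.length, 1)]

-- ===== PRECONDITION & SPEC =====
def Spec_can_arrange_trucks (trucks : List Int) (out : String) : Prop := out = can_arrange_trucks_alt trucks
instance (trucks : List Int) (out : String) : Decidable (Spec_can_arrange_trucks trucks out) := by unfold Spec_can_arrange_trucks; infer_instance

-- ===== CLAIM (what is proved, stated in full; the proofs are below) =====
def Claim_equal_can_arrange_trucks : Prop := ∀ (trucks : List Int), Dom_can_arrange_trucks trucks → Spec_can_arrange_trucks trucks (can_arrange_trucks trucks)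

-- ===== LEMMAS AND PROOFS =====

-- Proof-side reference model: the push-then-drain stack simulation, used as the bridge
-- between A's indexed loop and B's interval decomposition.
def bDrain : List Int → Int → List Int × Int
  | [], nt => ([], nt)
  | x :: r, nt => if x = nt then bDrain r (nt + 1) else (x :: r, nt)

def bGo : List Int → List Int → Int → String
  | [], stack, _ => if stack.isEmpty then "yes" else "no"
  | t :: rest, stack, nt =>
    let p := bDrain (t :: stack) nt
    bGo rest p.1 p.2

def simFold : List Int → List Int × Int → List Int × Int
  | [], st => st
  | a :: s, st => simFold s (bDrain (a :: st.1) st.2)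

-- B's algorithm as a structural recursion on one segment (the worklist flattens this)
def Seg : List Int → Int → Bool
  | [], _ => true
  | b :: r, t =>
    if b < t then false
    else if r.length < (b - t).toNat then false
    else Seg (r.take (b - t).toNat) t && Seg (r.drop (b - t).toNat) (b + 1)
termination_by s => s.length
decreasing_by
  · simp only [List.length_take, List.length_cons]
    omega
  · simp only [List.length_drop, List.length_cons]
    omega

theorem bDrain_ge (s : List Int) (n : Int) : n ≤ (bDrain s n).2 := by
  induction s generalizing n with
  | nil => simp [bDrain]
  | cons x r ih =>
    simp only [bDrain]
    split
    · exact le_trans (by omega) (ih (n + 1))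
    · simp

theorem bDrain_mem_lt (s : List Int) (n x : Int) (hx : x ∈ s) (hlt : x < n) :
    x ∈ (bDrain s n).1 ∧ x < (bDrain s n).2 := by
  induction s generalizing n with
  | nil => cases hx
  | cons y r ih =>
    simp only [bDrain]
    split
    · rename_i hy
      rcases List.mem_cons.1 hx with h | h
      · omega
      · exact ih (n + 1) h (by omega)
    · exact ⟨hx, hlt⟩

-- conservation: target + stack size is invariant under a drain
theorem bDrain_cons_len (s : List Int) (n : Int) :
    (bDrain s n).2 + ((bDrain s n).1.length : Int) = n + s.length := by
  induction s generalizing n with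
  | nil => simp [bDrain]
  | cons x r ih =>
    simp only [bDrain, List.length_cons]
    split
    · have := ih (n + 1)
      push_cast at this ⊢
      omega
    · simp

theorem bDrain_append (L M : List Int) (n : Int) :
    bDrain (L ++ M) n =
      if (bDrain L n).1 = [] then bDrain M (bDrain L n).2
      else ((bDrain L n).1 ++ M, (bDrain L n).2) := by
  induction L generalizing n with
  | nil => simp [bDrain]
  | cons x r ih =>
    simp only [List.cons_append, bDrain]
    split
    · exact ih (n + 1)
    · simp

theorem simFold_append (s1 s2 : List Int) (st : List Int × Int) :
    simFold (s1 ++ s2) st = simFold s2 (simFold s1 st) := by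
  induction s1 generalizing st with
  | nil => simp [simFold]
  | cons a s ih => simp only [List.cons_append, simFold]; exact ih _

theorem simFold_cons_len (s : List Int) (st : List Int × Int) :
    (simFold s st).2 + ((simFold s st).1.length : Int) = st.2 + st.1.length + s.length := by
  induction s generalizing st with
  | nil => simp [simFold]
  | cons a r ih =>
    simp only [simFold, List.length_cons]
    have h1 := ih (bDrain (a :: st.1) st.2)
    have h2 := bDrain_cons_len (a :: st.1) st.2
    simp only [List.length_cons] at h2
    push_cast at h1 h2 ⊢
    omega

theorem simFold_mem_lt (s : List Int) (st : List Int × Int) (x : Int)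
    (hx : x ∈ st.1) (hlt : x < st.2) :
    x ∈ (simFold s st).1 ∧ x < (simFold s st).2 := by
  induction s generalizing st with
  | nil => exact ⟨hx, hlt⟩
  | cons a r ih =>
    simp only [simFold]
    have h := bDrain_mem_lt (a :: st.1) st.2 x (List.mem_cons_of_mem _ hx) hlt
    exact ih _ h.1 h.2

-- a run above an untouchable lower stack L equals the isolated run, spilling into L
-- only when the isolated run's own stack empties at the very end
theorem simFold_embed (s : List Int) (S0 L : List Int) (t : Int)
    (hL : ∀ x ∈ L, (t + s.length + S0.length : Int) ≤ x)
    (hside : s = [] → S0 = [] → L = []) :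
    simFold s (S0 ++ L, t) =
      (if (simFold s (S0, t)).1 = [] then bDrain L (simFold s (S0, t)).2
       else ((simFold s (S0, t)).1 ++ L, (simFold s (S0, t)).2)) := by
  induction s generalizing S0 t with
  | nil =>
    by_cases h0 : S0 = []
    · have hLnil : L = [] := hside rfl h0
      subst h0; subst hLnil
      simp [simFold, bDrain]
    · simp [simFold, h0]
  | cons a s' ih =>
    simp only [simFold]
    rcases hdd : bDrain (a :: S0) t with ⟨D, τ⟩
    have hDlen : τ + (D.length : Int) = t + 1 + S0.length := by
      have hc := bDrain_cons_len (a :: S0) t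
      rw [hdd] at hc
      simp only [List.length_cons] at hc
      push_cast at hc ⊢
      omega
    have hsplit : bDrain (a :: (S0 ++ L)) t = if D = [] then bDrain L τ else (D ++ L, τ) := by
      rw [show a :: (S0 ++ L) = (a :: S0) ++ L from rfl, bDrain_append, hdd]
    rw [hsplit]
    by_cases hD : D = []
    · rw [if_pos hD]
      subst hD
      cases s' with
      | nil => simp [simFold]
      | cons c cs =>
        have hnopop : bDrain L τ = (L, τ) := by
          cases L with
          | nil => rfl
          | cons y ys =>
            have hy := hL y (by simp)
            simp only [List.length_cons] at hy
            have hne : ¬ y = τ := by push_cast at hy; omega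
            simp [bDrain, hne]
        rw [hnopop]
        have hrec := ih [] τ
          (by
            intro x hx
            have hy := hL x hx
            simp only [List.length_cons, List.length_nil] at hy ⊢
            push_cast at hy ⊢
            omega)
          (by intro hc; cases hc)
        simpa using hrec
    · rw [if_neg hD]
      exact ih D τ
        (by
          intro x hx
          have hy := hL x hx
          simp only [List.length_cons] at hy
          push_cast at hy ⊢
          omega)
        (by intro _ hc; exact absurd hc hD)

-- a run whose stack (with bottom element b) finally empties must pop b with target b,
-- splitting the input at that point
theorem simFold_bottom (s : List Int) (S : List Int) (b t : Int)
    (h : (simFold s (S ++ [b], t)).1 = []) :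
    ∃ j ≤ s.length, simFold (s.take j) (S ++ [b], t) = ([], b + 1) ∧
      simFold s (S ++ [b], t) = simFold (s.drop j) ([], b + 1) := by
  induction s generalizing S t with
  | nil => simp [simFold] at h
  | cons a s' ih =>
    rcases hdd : bDrain (a :: S) t with ⟨D, τ⟩
    have hsplit : bDrain (a :: (S ++ [b])) t = if D = [] then bDrain [b] τ else (D ++ [b], τ) := by
      rw [show a :: (S ++ [b]) = (a :: S) ++ [b] from rfl, bDrain_append, hdd]
    by_cases hD : D = []
    · by_cases hbt : b = τ
      · have hstate : bDrain (a :: (S ++ [b])) t = ([], b + 1) := by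
          rw [hsplit, if_pos hD]
          simp [bDrain, hbt]
        refine ⟨1, by simp, ?_, ?_⟩
        · simp [simFold, hstate]
        · simp [simFold, hstate]
      · have hstate : bDrain (a :: (S ++ [b])) t = ([b], τ) := by
          rw [hsplit, if_pos hD]
          simp [bDrain, hbt]
        have h' : (simFold s' (([] : List Int) ++ [b], τ)).1 = [] := by
          simp only [simFold] at h
          rw [hstate] at h
          simpa using h
        obtain ⟨j, hj, hjeq, hjrest⟩ := ih [] τ h'
        refine ⟨j + 1, by simp; omega, ?_, ?_⟩
        · simp only [List.take_succ_cons, simFold]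
          rw [hstate]
          simpa using hjeq
        · simp only [List.drop_succ_cons, simFold]
          rw [hstate]
          simpa using hjrest
    · have hstate : bDrain (a :: (S ++ [b])) t = (D ++ [b], τ) := by
        rw [hsplit, if_neg hD]
      have h' : (simFold s' (D ++ [b], τ)).1 = [] := by
        simp only [simFold] at h
        rw [hstate] at h
        exact h
      obtain ⟨j, hj, hjeq, hjrest⟩ := ih D τ h'
      refine ⟨j + 1, by simp; omega, ?_, ?_⟩
      · simp only [List.take_succ_cons, simFold]
        rw [hstate]
        exact hjeq
      · simp only [List.drop_succ_cons, simFold]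
        rw [hstate]
        exact hjrest

-- the simulation clears its stack exactly on the segments the decomposition accepts
theorem main_iff (n : Nat) (s : List Int) (hn : s.length ≤ n) (t : Int) :
    ((simFold s ([], t)).1 = []) ↔ (Seg s t = true) := by
  induction n generalizing s t with
  | zero =>
    have hs : s = [] := List.length_eq_zero_iff.1 (Nat.le_zero.1 hn)
    subst hs
    simp [simFold, Seg]
  | succ m ihm =>
    cases s with
    | nil => simp [simFold, Seg]
    | cons b r =>
      have hr : r.length ≤ m := by simp only [List.length_cons] at hn; omega
      by_cases hbt : b < t
      · have hbd : bDrain (b :: ([] : List Int)) t = ([b], t) := by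
          have : ¬ b = t := by omega
          simp [bDrain, this]
        constructor
        · intro h
          exfalso
          simp only [simFold] at h
          rw [hbd] at h
          have hmem := (simFold_mem_lt r ([b], t) b (by simp) hbt).1
          rw [h] at hmem
          cases hmem
        · intro hseg
          exfalso
          simp [Seg, hbt] at hseg
      · by_cases hbeq : b = t
        · subst hbeq
          have hbd : bDrain (b :: ([] : List Int)) b = ([], b + 1) := by
            simp [bDrain]
          have hSeg : Seg (b :: r) b = Seg r (b + 1) := by
            simp [Seg]
          simp only [simFold]
          rw [hbd, hSeg]
          exact ihm r hr (b + 1)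
        · have hbgt : t < b := lt_of_le_of_ne (not_lt.1 hbt) (Ne.symm hbeq)
          have hbd : bDrain (b :: ([] : List Int)) t = ([b], t) := by
            have : ¬ b = t := by omega
            simp [bDrain, this]
          simp only [simFold]
          rw [hbd]
          have hkval : ((b - t).toNat : Int) = b - t := by omega
          constructor
          · intro h
            obtain ⟨j, hj, hjeq, hjrest⟩ := simFold_bottom r [] b t (by simpa using h)
            have hlen := simFold_cons_len (r.take j) (([] : List Int) ++ [b], t)
            rw [hjeq] at hlen
            simp only [List.length_take, List.nil_append, List.length_cons, List.length_nil]
              at hlen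
            have hjk : j = (b - t).toNat := by
              have hmin : min j r.length = j := by omega
              rw [hmin] at hlen
              push_cast at hlen
              omega
            have hrest : (simFold (r.drop j) ([], b + 1)).1 = [] := by
              rw [← hjrest]
              simpa using h
            have hemb := simFold_embed (r.take j) [] [b] t
              (by
                intro x hx
                simp only [List.mem_singleton] at hx
                subst hx
                simp only [List.length_take, List.length_nil]
                have hmin : min j r.length = j := by omega
                rw [hmin]
                push_cast
                omega)
              (by
                intro hTake _
                exfalso
                have := congrArg List.length hTake
                simp only [List.length_take, List.length_nil] at this
                omega)
            by_cases hiso : (simFold (r.take j) ([], t)).1 = []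
            · have hsegL := (ihm (r.take j)
                (le_trans (by simp only [List.length_take]; omega) hr) t).1 hiso
              have hsegR := (ihm (r.drop j)
                (le_trans (by simp only [List.length_drop]; omega) hr) (b + 1)).1 hrest
              simp only [Seg, if_neg hbt]
              rw [if_neg (by omega : ¬ r.length < (b - t).toNat), ← hjk]
              simp [hsegL, hsegR]
            · exfalso
              simp only [List.nil_append] at hjeq hemb
              rw [hemb, if_neg hiso] at hjeq
              have := congrArg (fun p => p.1) hjeq
              simp at this
          · intro hseg
            have hguards : ¬ r.length < (b - t).toNat ∧ Seg (r.take (b - t).toNat) t = true ∧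
                Seg (r.drop (b - t).toNat) (b + 1) = true := by
              simp only [Seg, if_neg hbt] at hseg
              by_cases h1 : r.length < (b - t).toNat
              · rw [if_pos h1] at hseg; cases hseg
              · rw [if_neg h1] at hseg
                rw [Bool.and_eq_true] at hseg
                exact ⟨h1, hseg.1, hseg.2⟩
            obtain ⟨hlen', hsegL, hsegR⟩ := hguards
            have hisoL := (ihm (r.take (b - t).toNat)
              (le_trans (by simp only [List.length_take]; omega) hr) t).2 hsegL
            have hτ := simFold_cons_len (r.take (b - t).toNat) (([] : List Int), t)
            have hτval : (simFold (r.take (b - t).toNat) ([], t)).2 = t + (b - t).toNat := by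
              rw [hisoL] at hτ
              simp only [List.length_take, List.length_nil] at hτ
              have hmin : min (b - t).toNat r.length = (b - t).toNat := by omega
              rw [hmin] at hτ
              simp at hτ
              omega
            have hemb := simFold_embed (r.take (b - t).toNat) [] [b] t
              (by
                intro x hx
                simp only [List.mem_singleton] at hx
                rw [hx]
                simp only [List.length_take, List.length_nil]
                have hmin : min (b - t).toNat r.length = (b - t).toNat := by omega
                rw [hmin]
                push_cast
                omega)
              (by
                intro hTake _
                exfalso
                have := congrArg List.length hTake
                simp only [List.length_take, List.length_nil] at this
                omega)
            have hstate : simFold (r.take (b - t).toNat) ([b], t) = ([], b + 1) := by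
              simp only [List.nil_append] at hemb
              rw [hemb, if_pos hisoL, hτval]
              have hbk : b = t + ((b - t).toNat : Int) := by omega
              rw [← hbk]
              simp [bDrain]
            have hsplit2 : simFold r ([b], t) = simFold (r.drop (b - t).toNat) ([], b + 1) := by
              conv_lhs => rw [← List.take_append_drop (b - t).toNat r]
              rw [simFold_append, hstate]
            rw [hsplit2]
            exact (ihm (r.drop (b - t).toNat)
              (le_trans (by simp only [List.length_drop]; omega) hr) (b + 1)).2 hsegR

theorem bGo_simFold (s : List Int) (S : List Int) (t : Int) :
    bGo s S t = if (simFold s (S, t)).1.isEmpty then "yes" else "no" := by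
  induction s generalizing S t with
  | nil => simp [bGo, simFold]
  | cons a r ih => simp only [bGo, simFold]; exact ih _ _

theorem slice_cons (trucks : List Int) (lo hi : Nat) (h1 : lo < hi) (h2 : hi ≤ trucks.length) :
    (trucks.drop lo).take (hi - lo) =
      trucks.getD lo 0 :: (trucks.drop (lo + 1)).take (hi - (lo + 1)) := by
  have hlo : lo < trucks.length := lt_of_lt_of_le h1 h2
  rw [List.drop_eq_getElem_cons hlo, show hi - lo = (hi - (lo + 1)) + 1 by omega,
    List.take_succ_cons, List.getD_eq_getElem trucks 0 hlo]

theorem segLoop_eq (trucks : List Int) (todo : List (Nat × Nat × Int)) :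
    (∀ x ∈ todo, x.2.1 ≤ trucks.length) →
    segLoop trucks todo =
      if todo.all (fun x => Seg ((trucks.drop x.1).take (x.2.1 - x.1)) x.2.2) then "yes"
      else "no" := by
  fun_induction segLoop trucks todo with
  | case1 =>
    intro _
    simp
  | case2 lo hi t todo hge ih =>
    intro hub
    rw [ih (fun x hx => hub x (List.mem_cons_of_mem _ hx))]
    have hz : hi - lo = 0 := by omega
    have hS : Seg (List.take (hi - lo) (List.drop lo trucks)) t = true := by
      rw [hz]
      simp [Seg]
    simp only [List.all_cons, hS, Bool.true_and]
  | case3 lo hi t todo hge hbad =>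
    intro hub
    have hlt : lo < hi := by omega
    have hhi : hi ≤ trucks.length := hub (lo, hi, t) (by simp)
    have hsl := slice_cons trucks lo hi hlt hhi
    have hrl : ((trucks.drop (lo + 1)).take (hi - (lo + 1))).length = hi - (lo + 1) := by
      simp only [List.length_take, List.length_drop]
      omega
    have hSeg : Seg ((trucks.drop lo).take (hi - lo)) t = false := by
      rw [hsl]
      simp only [Seg]
      by_cases hbt : trucks.getD lo 0 < t
      · rw [if_pos hbt]
      · rcases hbad with hb1 | hb2
        · omega
        · rw [if_neg hbt, if_pos (by rw [hrl]; omega)]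
    simp [List.all_cons, hSeg]
  | case4 lo hi t todo hge hok ih =>
    intro hub
    have hlt : lo < hi := by omega
    have hhi : hi ≤ trucks.length := hub (lo, hi, t) (by simp)
    rw [not_or] at hok
    have hk1 : (((trucks.getD lo 0 - t).toNat : Int)) = trucks.getD lo 0 - t := by omega
    have hkle : lo + 1 + (trucks.getD lo 0 - t).toNat ≤ hi := by omega
    have hub' : ∀ x ∈ ((lo + 1 + (trucks.getD lo 0 - t).toNat, hi, trucks.getD lo 0 + 1) ::
        (lo + 1, lo + 1 + (trucks.getD lo 0 - t).toNat, t) :: todo), x.2.1 ≤ trucks.length := by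
      intro x hx
      rcases List.mem_cons.1 hx with rfl | hx
      · exact hhi
      · rcases List.mem_cons.1 hx with rfl | hx
        · show lo + 1 + (trucks.getD lo 0 - t).toNat ≤ trucks.length
          omega
        · exact hub x (List.mem_cons_of_mem _ hx)
    rw [ih hub']
    have hsl := slice_cons trucks lo hi hlt hhi
    have hrl : ((trucks.drop (lo + 1)).take (hi - (lo + 1))).length = hi - (lo + 1) := by
      simp only [List.length_take, List.length_drop]
      omega
    have hL : ((trucks.drop (lo + 1)).take (hi - (lo + 1))).take
          ((trucks.getD lo 0 - t).toNat) =
        (trucks.drop (lo + 1)).take ((lo + 1 + (trucks.getD lo 0 - t).toNat) - (lo + 1)) := by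
      rw [List.take_take,
        show min ((trucks.getD lo 0 - t).toNat) (hi - (lo + 1)) =
          lo + 1 + (trucks.getD lo 0 - t).toNat - (lo + 1) from by omega]
    have hR : ((trucks.drop (lo + 1)).take (hi - (lo + 1))).drop
          ((trucks.getD lo 0 - t).toNat) =
        (trucks.drop (lo + 1 + (trucks.getD lo 0 - t).toNat)).take
          (hi - (lo + 1 + (trucks.getD lo 0 - t).toNat)) := by
      rw [List.drop_take, List.drop_drop,
        show hi - (lo + 1) - (trucks.getD lo 0 - t).toNat =
          hi - (lo + 1 + (trucks.getD lo 0 - t).toNat) from by omega]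
    have hSeg : Seg ((trucks.drop lo).take (hi - lo)) t =
        (Seg ((trucks.drop (lo + 1)).take ((lo + 1 + (trucks.getD lo 0 - t).toNat) - (lo + 1))) t
          && Seg ((trucks.drop (lo + 1 + (trucks.getD lo 0 - t).toNat)).take
            (hi - (lo + 1 + (trucks.getD lo 0 - t).toNat))) (trucks.getD lo 0 + 1)) := by
      rw [hsl]
      simp only [Seg]
      rw [if_neg (by omega : ¬ trucks.getD lo 0 < t)]
      rw [if_neg (by rw [hrl]; omega)]
      rw [hL, hR]
    simp only [List.all_cons, hSeg]
    have hac : ∀ (a b c : Bool), (b && (a && c)) = ((a && b) && c) := by decide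
    simp only [hac]

-- ======== A-side lemmas (A's indexed loop equals the push-then-drain simulation) ========

theorem bDrain_stop (s : List Int) (n : Int) (h : (bDrain s n).2 = n) : bDrain s n = (s, n) := by
  cases s with
  | nil => simp [bDrain]
  | cons x r =>
    simp only [bDrain] at *
    split at h
    · exact absurd h (by have := bDrain_ge r (n + 1); omega)
    · simp [*]

-- a stack element below the current target is dead: B can never pop it, so B answers "no"
theorem bGo_dead (rest : List Int) (s : List Int) (n x : Int) (hx : x ∈ s) (hlt : x < n) :
    bGo rest s n = "no" := by
  induction rest generalizing s n with
  | nil =>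
    cases s with
    | nil => cases hx
    | cons y r => simp [bGo]
  | cons t rest ih =>
    simp only [bGo]
    have h := bDrain_mem_lt (t :: s) n x (List.mem_cons_of_mem _ hx) hlt
    exact ih _ _ h.1 h.2

theorem aFinish_dead (len : Nat) (s : List Int) (nt x : Int) (hx : x ∈ s) (hlt : x < nt) :
    aFinishLoop len nt s = "no" := by
  induction s generalizing nt with
  | nil => cases hx
  | cons y r ih =>
    simp only [aFinishLoop]
    split
    · rfl
    · rename_i hy
      rcases List.mem_cons.1 hx with h | h
      · omega
      · exact ih (nt + 1) h (by omega)

-- likewise a dead stack element forces A's answer to "no"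
theorem aLoop_dead (trucks : List Int) (nt : Int) (i : Nat) (stack : List Int)
    (x : Int) (hx : x ∈ stack) (hlt : x < nt) : aLoop trucks nt i stack = "no" := by
  rw [aLoop]
  split
  · rename_i h
    split_ifs with h1 h2 h3
    · exact aLoop_dead trucks (nt + 1) (i + 1) stack x hx (by omega)
    · cases stack with
      | nil => exact absurd rfl h2.1
      | cons top r =>
        simp only [List.headI] at h2
        simp only [List.tail_cons]
        rcases List.mem_cons.1 hx with he | he
        · omega
        · exact aLoop_dead trucks (nt + 1) i r x he (by omega)
    · exact aLoop_dead trucks nt (i + 1) _ x (List.mem_cons_of_mem _ hx) hlt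
    · rfl
  · exact aFinish_dead _ _ _ _ hx hlt
termination_by (trucks.length - i) + ((trucks.length : Int) + 1 - nt).toNat
decreasing_by
  · omega
  · omega
  · omega

-- A's trailing reverse drain + count check agrees with "drain, then test emptiness"
theorem aFinish_drain (len : Nat) (s : List Int) (nt : Int)
    (hinv : nt - 1 + (s.length : Int) = (len : Int)) :
    aFinishLoop len nt s = if (bDrain s nt).1.isEmpty then "yes" else "no" := by
  induction s generalizing nt with
  | nil =>
    have : nt - 1 = (len : Int) := by simpa using hinv
    simp [aFinishLoop, bDrain, this]
  | cons y r ih =>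
    by_cases hy : y = nt
    · have hl : aFinishLoop len nt (y :: r) = aFinishLoop len (nt + 1) r := by
        simp [aFinishLoop, hy]
      have hr : bDrain (y :: r) nt = bDrain r (nt + 1) := by simp [bDrain, hy]
      rw [hl, hr]
      exact ih (nt + 1) (by simp only [List.length_cons] at hinv; omega)
    · simp [aFinishLoop, bDrain, hy]

-- main simulation: A's loop state (i, nt, stack) answers exactly what the push-then-drain
-- simulation answers from the corresponding drained state on the remaining suffix
theorem aLoop_bGo (trucks : List Int) (nt : Int) (i : Nat) (stack : List Int)
    (hinv : nt - 1 + (stack.length : Int) = (i : Int)) (hi : i ≤ trucks.length) :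
    aLoop trucks nt i stack = bGo (trucks.drop i) (bDrain stack nt).1 (bDrain stack nt).2 := by
  rw [aLoop]
  split
  · rename_i h
    have hdrop : trucks.drop i = trucks[i]'h.1 :: trucks.drop (i + 1) :=
      List.drop_eq_getElem_cons h.1
    split_ifs with ht h2 h3
    · -- branch 1: trucks[i] == nextTarget
      rw [aLoop_bGo trucks (nt + 1) (i + 1) stack (by omega) h.1,
        hdrop, ht]
      simp only [bGo]
      cases stack with
      | nil => simp [bDrain]
      | cons top r =>
        by_cases htop : top = nt
        · have hdr : bDrain (top :: r) nt = bDrain r (nt + 1) := by simp [bDrain, htop]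
          rw [hdr]
          by_cases hstop : (bDrain r (nt + 1)).2 = nt + 1
          · rw [bDrain_stop r (nt + 1) hstop, htop]
          · have hge := bDrain_ge r (nt + 1)
            have h1 : bDrain (top :: r) (nt + 1) = (top :: r, nt + 1) := by
              have : ¬ top = nt + 1 := by omega
              simp [bDrain, this]
            have h2' : bDrain (nt :: (bDrain r (nt + 1)).1) (bDrain r (nt + 1)).2 =
                (nt :: (bDrain r (nt + 1)).1, (bDrain r (nt + 1)).2) := by
              have : ¬ nt = (bDrain r (nt + 1)).2 := by omega
              simp [bDrain, this]
            rw [h1, h2',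
              bGo_dead _ _ _ top (by simp) (by omega),
              bGo_dead _ _ _ nt (by simp) (by omega)]
        · -- no pending pop: both sides are the same drain
          simp [bDrain, htop]
    · -- branch 2: pop the stack
      cases stack with
      | nil => exact absurd rfl h2.1
      | cons top r =>
        simp only [List.headI] at h2
        simp only [List.tail_cons]
        rw [aLoop_bGo trucks (nt + 1) i r (by simp only [List.length_cons] at hinv; omega) hi]
        simp [bDrain, h2.2]
    · -- branch 3: push trucks[i]
      have hnd : bDrain stack nt = (stack, nt) := by
        cases stack with
        | nil => rfl
        | cons top r =>
          have : ¬ top = nt := by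
            intro hc
            exact h2 ⟨by simp, by simp [List.headI, hc]⟩
          simp [bDrain, this]
      rw [aLoop_bGo trucks nt (i + 1) (trucks[i]'h.1 :: stack)
        (by simp only [List.length_cons]; omega) h.1, hdrop]
      simp only [bGo]
      rw [hnd]
    · -- branch 4: early "no"; the stack top is dead on the simulation's side as well
      cases stack with
      | nil => exact absurd (Or.inl rfl) h3
      | cons top r =>
        have htlt : top < nt := by
          rcases lt_or_ge top nt with hc | hc
          · exact hc
          · exact absurd (Or.inr (by simpa [List.headI] using hc)) h3
        have hnd : bDrain (top :: r) nt = (top :: r, nt) := by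
          have : ¬ top = nt := by omega
          simp [bDrain, this]
        rw [hnd]
        exact (bGo_dead _ _ _ top (by simp) htlt).symm
  · rename_i h
    have hile : i = trucks.length := by
      by_cases hlt : i < trucks.length
      · have hnt : ¬ nt ≤ (trucks.length : Int) := fun hb => h ⟨hlt, hb⟩
        exfalso
        omega
      · omega
    subst hile
    rw [List.drop_length,
      aFinish_drain trucks.length stack nt (by omega)]
    simp [bGo]
termination_by (trucks.length - i) + ((trucks.length : Int) + 1 - nt).toNat
decreasing_by
  · omega
  · omega
  · omega

-- ===== VERDICT (by name: the statement is the Claim_ definition above) =====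
theorem can_arrange_trucks_spec : Claim_equal_can_arrange_trucks := by
  intro trucks _
  unfold Spec_can_arrange_trucks can_arrange_trucks can_arrange_trucks_alt
  have hA : aLoop trucks 1 0 [] = bGo trucks [] 1 := by
    simpa [bDrain] using aLoop_bGo trucks 1 0 [] (by simp) (Nat.zero_le _)
  have hB : segLoop trucks [(0, trucks.length, 1)] =
      if Seg trucks 1 then "yes" else "no" := by
    rw [segLoop_eq trucks [(0, trucks.length, 1)] (by simp)]
    simp
  rw [hA, hB, bGo_simFold]
  by_cases hseg : Seg trucks 1 = true
  · have h2 := (main_iff trucks.length trucks le_rfl 1).2 hseg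
    simp [hseg, h2]
  · have h2 : ¬ (simFold trucks ([], 1)).1 = [] :=
      fun hc => hseg ((main_iff trucks.length trucks le_rfl 1).1 hc)
    simp [hseg, h2]
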